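-- pv_equiv track=rewrite | github.com/Guillermo-Gil-Garro/GITSTER | pipeline/cards/render_print_sheets.py | parse_owners
-- ===== SOURCE A (Python) =====
-- from typing import Dict, List, Optional, Tuple
--
-- def safe_str(x) -> str:
--     return str(x if x is not None else "").strip()
--
-- def parse_owners(row: dict) -> List[str]:
--     candidates = [
--         row.get("owners_display"),
--         row.get("owners"),
--         row.get("playlist_owners"),
--         row.get("playlist_owner"),
--         row.get("owner"),
--         row.get("owners_canon"),
--     ]
--     raw = ""
--     for c in candidates:
--         raw = safe_str(c)
--         if raw:
--             break
--     if not raw: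
--         return []
--     for sep in ["|", ";", "·", "•", "/", "\\"]:
--         raw = raw.replace(sep, ",")
--     parts = [p.strip() for p in raw.split(",") if p.strip()]
--
--     seen = set()
--     out = []
--     for p in parts:
--         k = p.casefold()
--         if k not in seen:
--             seen.add(k)
--             out.append(p)
--     out.sort(key=lambda s: s.casefold())
--     return out
-- ===== SOURCE B (Python) =====
-- from typing import Dict, List, Optional, Tuple
--
-- def safe_str(x) -> str:
--     return str(x if x is not None else "").strip()
--
-- def parse_owners(row: dict) -> List[str]:
--     keys = ("owners_display", "owners", "playlist_owners",
--             "playlist_owner", "owner", "owners_canon")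
--     raw = next((s for s in (safe_str(row.get(k)) for k in keys) if s), "")
--     if not raw:
--         return []
--     for sep in ["|", ";", "\u00b7", "\u2022", "/", "\\"]:
--         raw = raw.replace(sep, ",")
--     parts = [p.strip() for p in raw.split(",") if p.strip()]
--     # stable-sort first, then one adjacent-dedup pass (no seen-set, no final sort)
--     parts.sort(key=str.casefold)
--     out: List[str] = []
--     for p in parts:
--         if not out or out[-1].casefold() != p.casefold():
--             out.append(p)
--     return out
-- ===== Notes on version B (the rewrite author's own statement) =====
-- stated objective: idiomatic
-- what changed: B drops A's seen-set dedup loop and final sort: it stable-sorts the parts by casefold once and then removes duplicates in a single adjacent-comparison pass (stability keeps the first-occurrence spelling, so the result is identical).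
import Mathlib
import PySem

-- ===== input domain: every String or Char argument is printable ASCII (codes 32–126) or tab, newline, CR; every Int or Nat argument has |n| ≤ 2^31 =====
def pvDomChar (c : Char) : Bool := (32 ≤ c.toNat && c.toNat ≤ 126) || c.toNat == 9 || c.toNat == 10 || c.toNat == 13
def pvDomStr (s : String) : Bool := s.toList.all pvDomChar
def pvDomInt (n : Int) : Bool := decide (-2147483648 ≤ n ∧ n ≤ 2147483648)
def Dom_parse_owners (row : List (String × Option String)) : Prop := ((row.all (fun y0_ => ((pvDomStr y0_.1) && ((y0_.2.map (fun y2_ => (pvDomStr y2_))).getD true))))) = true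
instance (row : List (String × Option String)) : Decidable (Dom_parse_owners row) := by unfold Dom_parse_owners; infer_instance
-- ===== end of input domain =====

-- B replaces A's seen-set dedup loop + final sort by one stable sort followed by a single
-- adjacent-dedup pass (objective: idiomatic/alternative; same asymptotic cost).
-- Python's str.casefold is ported as PySem.Str.lower — exact on the ASCII domain above.

-- ===== PORT A =====
-- module helper safe_str(x) = str(x if x is not None else "").strip() (used by both A and B)
def pvSafeStr (c : Option String) : String := PySem.Str.strip (c.getD "")

-- A's 'for c in candidates: raw = safe_str(c); if raw: break' (raw is "" when every candidate strips empty)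
def pvFirstRawA : List (Option String) → String
  | [] => ""
  | c :: cs => let raw := pvSafeStr c; if raw ≠ "" then raw else pvFirstRawA cs

def parse_owners (row : List (String × Option String)) : List String :=
  let candidates : List (Option String) :=
    [ (PySem.Dict.get? ⟨row⟩ "owners_display").getD none,
      (PySem.Dict.get? ⟨row⟩ "owners").getD none,
      (PySem.Dict.get? ⟨row⟩ "playlist_owners").getD none,
      (PySem.Dict.get? ⟨row⟩ "playlist_owner").getD none,
      (PySem.Dict.get? ⟨row⟩ "owner").getD none,
      (PySem.Dict.get? ⟨row⟩ "owners_canon").getD none ]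
  let raw := pvFirstRawA candidates
  if raw = "" then []
  else
    let raw := ["|", ";", "·", "•", "/", "\\"].foldl (fun r sep => PySem.Str.replace r sep ",") raw
    -- [p.strip() for p in raw.split(",") if p.strip()]  (sep "," ≠ "", so split? is some)
    let parts := (((PySem.Str.split? raw ",").getD []).filter
        (fun p => PySem.Str.strip p ≠ "")).map PySem.Str.strip
    let st := parts.foldl
      (fun (st : PySem.Set String × List String) p =>
        let k := PySem.Str.lower p
        if PySem.Set.contains st.1 k then st else (PySem.Set.add st.1 k, st.2 ++ [p]))
      (PySem.Set.empty, [])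
    PySem.List.sorted st.2 (fun s => PySem.Str.lower s)

-- ===== PORT B =====
def parse_owners_alt (row : List (String × Option String)) : List String :=
  let keys : List String :=
    ["owners_display", "owners", "playlist_owners", "playlist_owner", "owner", "owners_canon"]
  -- next((s for s in (safe_str(row.get(k)) for k in keys) if s), "")
  let raw := ((keys.map (fun k => pvSafeStr ((PySem.Dict.get? ⟨row⟩ k).getD none))).find?
      (fun s => s ≠ "")).getD ""
  if raw = "" then []
  else
    let raw := ["|", ";", "·", "•", "/", "\\"].foldl (fun r sep => PySem.Str.replace r sep ",") raw
    let parts := (((PySem.Str.split? raw ",").getD []).filter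
        (fun p => PySem.Str.strip p ≠ "")).map PySem.Str.strip
    let sortedParts := PySem.List.sorted parts (fun s => PySem.Str.lower s)
    sortedParts.foldl
      (fun (out : List String) p =>
        match out.getLast? with
        | none => out ++ [p]
        | some q => if PySem.Str.lower q ≠ PySem.Str.lower p then out ++ [p] else out)
      []

-- ===== PRECONDITION & SPEC =====
def Spec_parse_owners (row : List (String × Option String)) (out : List String) : Prop := out = parse_owners_alt row
instance (row : List (String × Option String)) (out : List String) : Decidable (Spec_parse_owners row out) := by unfold Spec_parse_owners; infer_instance

-- ===== CLAIM (what is proved, stated in full; the proofs are below) =====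
def Claim_equal_parse_owners : Prop := ∀ (row : List (String × Option String)), Dom_parse_owners row → Spec_parse_owners row (parse_owners row)


-- ===== LEMMAS AND PROOFS =====

-- canonical "first spelling per casefold key" recursion used to relate both ports
def pvRecD : List String → List String
  | [] => []
  | x :: xs => x :: pvRecD (xs.filter (fun y => PySem.Str.lower y != PySem.Str.lower x))
termination_by l => l.length
decreasing_by simpa using Nat.lt_succ_of_le (List.length_filter_le _ xs)

theorem pvRecD_ind (P : List String → Prop) (nil : P [])
    (cons : ∀ x xs, P (xs.filter (fun y => PySem.Str.lower y != PySem.Str.lower x)) → P (x :: xs)) :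
    ∀ l, P l
  | [] => nil
  | x :: xs => cons x xs (pvRecD_ind P nil cons
      (xs.filter (fun y => PySem.Str.lower y != PySem.Str.lower x)))
termination_by l => l.length
decreasing_by simpa using Nat.lt_succ_of_le (List.length_filter_le _ xs)

theorem mem_pvRecD_sub {y : String} {l : List String} (h : y ∈ pvRecD l) : y ∈ l := by
  induction l using pvRecD_ind with
  | nil => simp [pvRecD] at h
  | cons x xs ih =>
    rw [pvRecD] at h
    rcases List.mem_cons.mp h with h | h
    · simp [h]
    · exact List.mem_cons_of_mem _ (List.mem_of_mem_filter (ih h))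

theorem pvRecD_key_ne {y x : String} {xs : List String}
    (h : y ∈ pvRecD (xs.filter (fun y => PySem.Str.lower y != PySem.Str.lower x))) :
    PySem.Str.lower y ≠ PySem.Str.lower x := by
  have h2 := List.of_mem_filter (mem_pvRecD_sub h)
  simpa using h2

theorem pvRecD_nodup (l : List String) : (pvRecD l).Nodup := by
  induction l using pvRecD_ind with
  | nil => simp [pvRecD]
  | cons x xs ih =>
    rw [pvRecD]
    exact List.nodup_cons.mpr ⟨fun hx => pvRecD_key_ne hx rfl, ih⟩

theorem pvRecD_pairwise_lt (l : List String)
    (h : l.Pairwise (fun a b => PySem.Str.lower a ≤ PySem.Str.lower b)) :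
    (pvRecD l).Pairwise (fun a b => PySem.Str.lower a < PySem.Str.lower b) := by
  induction l using pvRecD_ind with
  | nil => simp [pvRecD]
  | cons x xs ih =>
    rw [pvRecD]
    rcases List.pairwise_cons.mp h with ⟨hx, hxs⟩
    refine List.pairwise_cons.mpr ⟨fun y hy => ?_, ih (List.Pairwise.filter _ hxs)⟩
    have hne : PySem.Str.lower y ≠ PySem.Str.lower x := pvRecD_key_ne hy
    have hmem : y ∈ xs := List.mem_of_mem_filter (mem_pvRecD_sub hy)
    exact lt_of_le_of_ne (hx y hmem) (Ne.symm hne)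

theorem mem_pvRecD (x : String) (l : List String) :
    x ∈ pvRecD l ↔ (l.filter (fun y => PySem.Str.lower y == PySem.Str.lower x)).head? = some x := by
  induction l using pvRecD_ind with
  | nil => simp [pvRecD]
  | cons a l ih =>
    rw [pvRecD]
    by_cases h : PySem.Str.lower a = PySem.Str.lower x
    · rw [List.filter_cons_of_pos (by simpa using h)]
      simp only [List.head?_cons, List.mem_cons, Option.some.injEq]
      constructor
      · rintro (rfl | hx)
        · rfl
        · exact absurd h (Ne.symm (pvRecD_key_ne hx))
      · rintro rfl; exact Or.inl rfl
    · rw [List.filter_cons_of_neg (by simpa using h)]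
      have hxa : x ≠ a := fun he => h (by rw [he])
      simp only [List.mem_cons, hxa, false_or]
      rw [ih, List.filter_filter]
      have hfil : l.filter (fun y =>
            (PySem.Str.lower y == PySem.Str.lower x) && (PySem.Str.lower y != PySem.Str.lower a))
          = l.filter (fun y => PySem.Str.lower y == PySem.Str.lower x) := by
        apply List.filter_congr
        intro y _
        by_cases hy : PySem.Str.lower y = PySem.Str.lower x
        · have hxa' : ¬ PySem.Str.lower x = PySem.Str.lower a := fun he => h he.symm
          simp [hy, hxa']
        · simp [hy]
      rw [hfil]

-- stability of PySem's insertion sort, phrased through filters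
theorem pvInsertBy_filter (acc : List String) (x : String) (c : String)
    (h : acc.Pairwise (fun a b => PySem.Str.lower a ≤ PySem.Str.lower b)) :
    (PySem.List.insertBy (fun a b => decide (PySem.Str.lower a < PySem.Str.lower b)) x acc).filter
        (fun y => PySem.Str.lower y == c)
      = acc.filter (fun y => PySem.Str.lower y == c)
        ++ (if PySem.Str.lower x == c then [x] else []) := by
  induction acc with
  | nil =>
    simp [PySem.List.insertBy, List.filter_cons]
  | cons y ys ih =>
    rcases List.pairwise_cons.mp h with ⟨hy, hys⟩
    rw [PySem.List.insertBy]
    by_cases hlt : PySem.Str.lower x < PySem.Str.lower y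
    · rw [if_pos (by simpa using hlt)]
      by_cases hc : PySem.Str.lower x = c
      · have hn : (y :: ys).filter (fun z => PySem.Str.lower z == c) = [] := by
          rw [List.filter_eq_nil_iff]
          intro z hz
          have hle : PySem.Str.lower y ≤ PySem.Str.lower z := by
            rcases List.mem_cons.mp hz with rfl | hz'
            · exact le_refl _
            · exact hy z hz'
          have : c < PySem.Str.lower z := hc ▸ lt_of_lt_of_le hlt hle
          simpa using ne_of_gt this
        rw [List.filter_cons_of_pos (by simpa using hc), hn, if_pos (by simpa using hc)]
        simp
      · rw [List.filter_cons_of_neg (by simpa using hc), if_neg (by simpa using hc)]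
        simp
    · rw [if_neg (by simpa using hlt)]
      by_cases hyc : PySem.Str.lower y = c
      · rw [List.filter_cons_of_pos (by simpa using hyc),
          List.filter_cons_of_pos (by simpa using hyc), ih hys, List.cons_append]
      · rw [List.filter_cons_of_neg (by simpa using hyc),
          List.filter_cons_of_neg (by simpa using hyc), ih hys]

theorem pvSorted_filter (l : List String) (c : String) :
    (PySem.List.sorted l (fun s => PySem.Str.lower s)).filter (fun y => PySem.Str.lower y == c)
      = l.filter (fun y => PySem.Str.lower y == c) := by
  induction l using List.reverseRecOn with
  | nil => simp [PySem.List.sorted]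
  | append_singleton l x ih =>
    have hstep : PySem.List.sorted (l ++ [x]) (fun s => PySem.Str.lower s)
        = PySem.List.insertBy (fun a b => decide (PySem.Str.lower a < PySem.Str.lower b)) x
            (PySem.List.sorted l (fun s => PySem.Str.lower s)) := by
      rw [PySem.List.sorted_eq_foldl_insertBy, PySem.List.sorted_eq_foldl_insertBy,
        List.foldl_append]
      rfl
    rw [hstep, pvInsertBy_filter _ _ _ (PySem.List.sorted_pairwise l _), ih,
      List.filter_append]
    simp [List.filter_cons]

-- A's seen-set loop computes pvRecD
theorem pvAFold (l : List String) (seen : PySem.Set String) (out : List String) :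
    (l.foldl
      (fun (st : PySem.Set String × List String) p =>
        let k := PySem.Str.lower p
        if PySem.Set.contains st.1 k then st else (PySem.Set.add st.1 k, st.2 ++ [p]))
      (seen, out)).2
    = out ++ pvRecD (l.filter (fun y => ! PySem.Set.contains seen (PySem.Str.lower y))) := by
  induction l generalizing seen out with
  | nil => simp [pvRecD]
  | cons x l ih =>
    simp only [List.foldl_cons]
    by_cases hx : PySem.Set.contains seen (PySem.Str.lower x)
    · rw [if_pos hx, ih, List.filter_cons_of_neg (by simpa using hx)]
    · rw [if_neg hx, ih, List.filter_cons_of_pos (by simpa using hx)]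
      rw [pvRecD, List.filter_filter]
      have hfil : l.filter (fun y =>
            (PySem.Str.lower y != PySem.Str.lower x) && ! PySem.Set.contains seen (PySem.Str.lower y))
          = l.filter (fun y =>
            ! PySem.Set.contains (PySem.Set.add seen (PySem.Str.lower x)) (PySem.Str.lower y)) := by
        apply List.filter_congr
        intro y _
        have hadd : PySem.Set.add seen (PySem.Str.lower x) = seen ++ [PySem.Str.lower x] := by
          simp only [PySem.Set.add]
          rw [if_neg hx]
        rw [hadd]
        show _ = (! List.contains (seen ++ [PySem.Str.lower x]) (PySem.Str.lower y))
        rw [List.contains_append]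
        cases h1 : List.contains seen (PySem.Str.lower y) <;>
          cases h2 : PySem.Str.lower y == PySem.Str.lower x <;>
            simp_all [PySem.Set.contains, bne]
      rw [hfil]
      simp

-- B's adjacent-dedup pass, as a structural recursion
def pvGo : String → List String → List String
  | _, [] => []
  | prev, y :: ys =>
    if PySem.Str.lower y = PySem.Str.lower prev then pvGo prev ys else y :: pvGo y ys

theorem pvBFold (l : List String) (init : List String) (prev : String) :
    l.foldl
      (fun (out : List String) p =>
        match out.getLast? with
        | none => out ++ [p]
        | some q => if PySem.Str.lower q ≠ PySem.Str.lower p then out ++ [p] else out)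
      (init ++ [prev])
    = init ++ [prev] ++ pvGo prev l := by
  induction l generalizing init prev with
  | nil => simp [pvGo]
  | cons y ys ih =>
    simp only [List.foldl_cons, List.getLast?_concat]
    by_cases h : PySem.Str.lower y = PySem.Str.lower prev
    · rw [if_neg (by simp [h]), ih, pvGo, if_pos h]
    · rw [if_pos (fun he => h he.symm), pvGo, if_neg h]
      have := ih (init ++ [prev]) y
      rw [List.append_assoc, List.singleton_append] at this
      rw [List.append_assoc, List.singleton_append, this]
      simp

theorem pvGo_eq (s : List String) (prev : String)
    (hs : s.Pairwise (fun a b => PySem.Str.lower a ≤ PySem.Str.lower b))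
    (hb : ∀ y ∈ s, PySem.Str.lower prev ≤ PySem.Str.lower y) :
    pvGo prev s = pvRecD (s.filter (fun y => PySem.Str.lower y != PySem.Str.lower prev)) := by
  induction s generalizing prev with
  | nil => simp [pvGo, pvRecD]
  | cons y ys ih =>
    rcases List.pairwise_cons.mp hs with ⟨hy, hys⟩
    rw [pvGo]
    by_cases h : PySem.Str.lower y = PySem.Str.lower prev
    · rw [if_pos h, List.filter_cons_of_neg (by simpa using h)]
      exact ih prev hys (fun z hz => h ▸ hy z hz)
    · rw [if_neg h, List.filter_cons_of_pos (by simpa using h)]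
      rw [pvRecD]
      have hlt : PySem.Str.lower prev < PySem.Str.lower y :=
        lt_of_le_of_ne (hb y (List.mem_cons_self ..)) (Ne.symm h)
      have hfil : ys.filter (fun z => PySem.Str.lower z != PySem.Str.lower prev) = ys := by
        rw [List.filter_eq_self]
        intro z hz
        have := lt_of_lt_of_le hlt (hy z hz)
        simpa using ne_of_gt this
      rw [hfil]
      exact congrArg (y :: ·) (ih y hys hy)

theorem pvRecD_sorted_eq (parts : List String) :
    PySem.List.sorted (pvRecD parts) (fun s => PySem.Str.lower s)
      = pvRecD (PySem.List.sorted parts (fun s => PySem.Str.lower s)) := by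
  apply PySem.List.sorted_eq_of_perm_of_pairwise_lt
  · rw [List.perm_ext_iff_of_nodup (pvRecD_nodup _) (pvRecD_nodup _)]
    intro x
    rw [mem_pvRecD, mem_pvRecD, pvSorted_filter]
  · exact pvRecD_pairwise_lt _ (PySem.List.sorted_pairwise _ _)

-- A's candidate loop = B's find? over the mapped candidates
theorem pvFirstRaw_eq (l : List (Option String)) :
    pvFirstRawA l = ((l.map pvSafeStr).find? (fun s => s ≠ "")).getD "" := by
  induction l with
  | nil => simp [pvFirstRawA]
  | cons c cs ih =>
    rw [pvFirstRawA]
    simp only [List.map_cons, List.find?_cons]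
    by_cases h : pvSafeStr c = ""
    · simp [h, ih]
    · simp [h]

-- B's sorted-then-adjacent-dedup pass equals pvRecD of the sorted list
theorem pvBDedup_eq (parts : List String) :
    (PySem.List.sorted parts (fun s => PySem.Str.lower s)).foldl
      (fun (out : List String) p =>
        match out.getLast? with
        | none => out ++ [p]
        | some q => if PySem.Str.lower q ≠ PySem.Str.lower p then out ++ [p] else out)
      []
    = pvRecD (PySem.List.sorted parts (fun s => PySem.Str.lower s)) := by
  have hpw := PySem.List.sorted_pairwise parts (fun s => PySem.Str.lower s)
  cases hsp : PySem.List.sorted parts (fun s => PySem.Str.lower s) with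
  | nil => simp [pvRecD]
  | cons x s =>
    rw [hsp] at hpw
    rcases List.pairwise_cons.mp hpw with ⟨hx, hsw⟩
    rw [List.foldl_cons]
    have h0 : (([] : List String) ++ [x]) = [x] := rfl
    have := pvBFold s [] x
    rw [h0] at this
    simp only [List.getLast?_nil]
    rw [List.nil_append, this, pvGo_eq s x hsw hx, pvRecD]
    simp

-- the common tail of both ports, from the raw string on
theorem pvTail_eq (raw : String) :
    (if raw = "" then ([] : List String)
     else
       let raw2 := ["|", ";", "·", "•", "/", "\\"].foldl (fun r sep => PySem.Str.replace r sep ",") raw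
       let parts := (((PySem.Str.split? raw2 ",").getD []).filter
           (fun p => PySem.Str.strip p ≠ "")).map PySem.Str.strip
       PySem.List.sorted
         (parts.foldl
           (fun (st : PySem.Set String × List String) p =>
             if PySem.Set.contains st.1 (PySem.Str.lower p) then st
             else (PySem.Set.add st.1 (PySem.Str.lower p), st.2 ++ [p]))
           (PySem.Set.empty, [])).2
         (fun s => PySem.Str.lower s))
    = (if raw = "" then ([] : List String)
       else
         let raw2 := ["|", ";", "·", "•", "/", "\\"].foldl (fun r sep => PySem.Str.replace r sep ",") raw
         let parts := (((PySem.Str.split? raw2 ",").getD []).filter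
             (fun p => PySem.Str.strip p ≠ "")).map PySem.Str.strip
         (PySem.List.sorted parts (fun s => PySem.Str.lower s)).foldl
           (fun (out : List String) p =>
             match out.getLast? with
             | none => out ++ [p]
             | some q => if PySem.Str.lower q ≠ PySem.Str.lower p then out ++ [p] else out)
           []) := by
  by_cases h : raw = ""
  · rw [if_pos h, if_pos h]
  · rw [if_neg h, if_neg h]
    simp only []
    rw [pvBDedup_eq, pvAFold]
    have h2 : ∀ (P : List String),
        P.filter (fun y => ! PySem.Set.contains PySem.Set.empty (PySem.Str.lower y)) = P := by
      intro P
      rw [List.filter_eq_self]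
      intro z _
      simp [PySem.Set.contains, PySem.Set.empty]
    rw [h2, List.nil_append]
    exact pvRecD_sorted_eq _

-- ===== VERDICT (by name: the statement is the Claim_ definition above) =====
theorem parse_owners_spec : Claim_equal_parse_owners := by
  intro row _hdom
  show parse_owners row = parse_owners_alt row
  simp only [parse_owners, parse_owners_alt, List.map_cons, List.map_nil]
  rw [pvFirstRaw_eq]
  simp only [List.map_cons, List.map_nil]
  exact pvTail_eq _
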